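-- pv_equiv track=rewrite | github.com/These-SCAI2023/L6SOPROG | REMISE_ETUDIANTS/L6SOPRG2 -TD1-88437/Ye Liu_34300_assignsubmission_file/TD1 21301082/td1.py | texte_a_trigram
-- ===== SOURCE A (Python) =====
-- def texte_a_trigram(texte):
--     mots=texte.split()
--     liste_trigram=[]
--     for m in mots :
--         i=0
--         while i<len(m)-3+1:
--             tri=m[i:i+3]
--             liste_trigram.append(tri)
--             i+=1
--     return liste_trigram
-- ===== SOURCE B (Python) =====
-- def texte_a_trigram(texte):
--     liste_trigram = []
--     buf = ''
--     for c in texte: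
--         if c.isspace():
--             buf = ''
--         else:
--             buf += c
--             if len(buf) == 3:
--                 liste_trigram.append(buf)
--                 buf = buf[1:]
--     return liste_trigram
-- ===== Notes on version B (the rewrite author's own statement) =====
-- stated objective: alternative
-- what changed: Instead of split() followed by a per-word index loop slicing m[i:i+3], B makes a single pass over the raw characters of the text, maintaining a sliding buffer of at most three non-space characters that is reset at whitespace and emitted whenever full; no word list is ever built.
import Mathlib
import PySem

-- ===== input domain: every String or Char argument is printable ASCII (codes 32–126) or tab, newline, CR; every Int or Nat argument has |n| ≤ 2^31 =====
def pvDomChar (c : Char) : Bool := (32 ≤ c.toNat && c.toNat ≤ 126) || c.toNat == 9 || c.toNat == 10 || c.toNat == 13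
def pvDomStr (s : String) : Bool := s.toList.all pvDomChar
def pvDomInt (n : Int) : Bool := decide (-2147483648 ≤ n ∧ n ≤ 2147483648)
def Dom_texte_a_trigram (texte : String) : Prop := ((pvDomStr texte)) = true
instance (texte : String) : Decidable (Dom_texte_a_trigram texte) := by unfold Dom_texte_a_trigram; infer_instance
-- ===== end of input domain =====

-- B replaces A's split()-then-index-loop by a single pass over the raw characters with a
-- 3-char sliding buffer reset at whitespace (no word list is built; objective: alternative).

-- ===== PORT A =====
-- A's inner 'while i < len(m)-3+1' loop, appending m[i:i+3] each turn.
def pvWhileA (m : String) (i : Nat) (acc : List String) : List String :=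
  if h : (i : Int) < PySem.Str.len m - 3 + 1 then
    pvWhileA m (i + 1) (acc ++ [PySem.Str.slice m (some (i : Int)) (some ((i : Int) + 3))])
  else acc
termination_by m.toList.length - i
decreasing_by
  simp only [PySem.Str.len] at h
  omega

def texte_a_trigram (texte : String) : List String :=
  (PySem.Str.split₀ texte).foldl (fun liste_trigram m => pvWhileA m 0 liste_trigram) []

-- ===== PORT B =====
-- Source B's single for-loop over the characters: buf holds the last ≤2 non-space chars;
-- 'buf = buf[1:]' on the 3-char buffer is its tail.
def pvScanB : List Char → List Char → List String → List String
  | [], _, out => out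
  | c :: rest, buf, out =>
    if PySem.Chars.isspace c then pvScanB rest [] out
    else
      let buf' := buf ++ [c]
      if buf'.length = 3 then pvScanB rest buf'.tail (out ++ [String.ofList buf'])
      else pvScanB rest buf' out

def texte_a_trigram_alt (texte : String) : List String :=
  pvScanB texte.toList [] []

-- ===== PRECONDITION & SPEC =====
def Spec_texte_a_trigram (texte : String) (out : List String) : Prop := out = texte_a_trigram_alt texte
instance (texte : String) (out : List String) : Decidable (Spec_texte_a_trigram texte out) := by unfold Spec_texte_a_trigram; infer_instance

-- ===== CLAIM (what is proved, stated in full; the proofs are below) =====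
def Claim_equal_texte_a_trigram : Prop := ∀ (texte : String), Dom_texte_a_trigram texte → Spec_texte_a_trigram texte (texte_a_trigram texte)

-- ===== LEMMAS AND PROOFS =====
-- All trigrams of a word, as a proof-side recursive function.
def triOf : List Char → List String
  | a :: b :: c :: t => String.ofList [a, b, c] :: triOf (b :: c :: t)
  | _ => []

lemma triOf_cons3 (a b c : Char) (t : List Char) :
    triOf (a :: b :: c :: t) = String.ofList [a, b, c] :: triOf (b :: c :: t) := rfl

lemma triOf_short (l : List Char) (h : l.length < 3) : triOf l = [] := by
  match l, h with
  | [], _ => rfl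
  | [_], _ => rfl
  | [_, _], _ => rfl

theorem triOf_snoc2 : ∀ (w : List Char) (x y c : Char),
    triOf (w ++ [x, y, c]) = triOf (w ++ [x, y]) ++ [String.ofList [x, y, c]]
  | [], x, y, c => by simp [triOf]
  | [a], x, y, c => by simp [triOf]
  | a :: b :: t, x, y, c => by
    have ih := triOf_snoc2 (b :: t) x y c
    cases t with
    | nil => simp [triOf]
    | cons d t' =>
      simp only [List.cons_append] at ih ⊢
      rw [triOf_cons3, triOf_cons3, ih]
      simp

lemma pvWhileA_eq (m : String) (i : Nat) (acc : List String) :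
    pvWhileA m i acc = acc ++ triOf (m.toList.drop i) := by
  by_cases h : (i : Int) < PySem.Str.len m - 3 + 1
  · rw [pvWhileA, dif_pos h]
    have hlen : i + 3 ≤ m.toList.length := by
      simp only [PySem.Str.len] at h; omega
    have hdrop : (m.toList.drop i).length = m.toList.length - i := List.length_drop ..
    obtain ⟨a, b, c, rest, hl⟩ : ∃ a b c rest, m.toList.drop i = a :: b :: c :: rest := by
      have h3 : 3 ≤ (m.toList.drop i).length := by rw [hdrop]; omega
      rcases he : m.toList.drop i with _ | ⟨a, _ | ⟨b, _ | ⟨c, rest⟩⟩⟩ <;>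
        first
          | exact ⟨_, _, _, _, rfl⟩
          | (rw [he] at h3; simp at h3)
    have hslice : PySem.Str.slice m (some (i : Int)) (some ((i : Int) + 3)) = String.ofList [a, b, c] := by
      apply String.toList_inj.mp
      rw [PySem.Str.toList_slice, PySem.Chars.slice_eq_listSlice]
      have hc : ((i : Int) + 3) = ((i + 3 : Nat) : Int) := by push_cast; ring
      rw [hc, PySem.List.slice_natCast]
      simp [hl]
    have hnext : m.toList.drop (i + 1) = b :: c :: rest := by
      rw [← List.tail_drop, hl]; rfl
    rw [pvWhileA_eq m (i + 1), hslice, hl, hnext, triOf_cons3]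
    simp
  · rw [pvWhileA, dif_neg h]
    have : (m.toList.drop i).length < 3 := by
      simp only [PySem.Str.len] at h
      have := List.length_drop (l := m.toList) (i := i)
      omega
    rw [triOf_short _ this, List.append_nil]
termination_by m.toList.length - i
decreasing_by
  simp only [PySem.Str.len] at h
  omega

lemma foldl_whileA (ws : List String) (acc : List String) :
    ws.foldl (fun liste m => pvWhileA m 0 liste) acc
      = acc ++ ws.flatMap (fun m => triOf m.toList) := by
  induction ws generalizing acc with
  | nil => simp
  | cons w rest ih =>
    rw [List.foldl_cons, pvWhileA_eq, ih, List.flatMap_cons]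
    simp [List.append_assoc]

-- B's scan only appends to its output accumulator.
lemma pvScanB_out (cs : List Char) : ∀ (buf : List Char) (out : List String),
    pvScanB cs buf out = out ++ pvScanB cs buf [] := by
  induction cs with
  | nil => intro buf out; simp [pvScanB]
  | cons c rest ih =>
    intro buf out
    by_cases hs : PySem.Chars.isspace c
    · simp only [pvScanB, hs, if_true]
      rw [ih [] out, ih [] []]
    · simp only [pvScanB, hs, Bool.false_eq_true, if_false]
      by_cases h3 : (buf ++ [c]).length = 3
      · simp only [h3, if_true]
        rw [ih _ (out ++ _), ih _ ([] ++ _)]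
        simp
      · simp only [h3, if_false]
        rw [ih _ out, ih _ ([])]

-- The bridge: flattening A's per-word trigrams over split₀'s scanner equals B's scan.
lemma go_scan (cs : List Char) : ∀ (cur : List Char) (acc : List (List Char)),
    (PySem.Chars.split₀.go cs cur acc).flatMap triOf
      = acc.reverse.flatMap triOf ++ triOf cur.reverse
          ++ pvScanB cs ((cur.take 2).reverse) [] := by
  induction cs with
  | nil =>
    intro cur acc
    cases cur with
    | nil => simp [PySem.Chars.split₀.go, pvScanB, triOf]
    | cons x xs => simp [PySem.Chars.split₀.go, pvScanB]
  | cons c rest ih =>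
    intro cur acc
    by_cases hs : PySem.Chars.isspace c
    · cases cur with
      | nil =>
        simp only [PySem.Chars.split₀.go, hs, if_true, List.isEmpty_nil]
        rw [ih [] acc]
        simp [pvScanB, hs, triOf]
      | cons x xs =>
        simp only [PySem.Chars.split₀.go, hs, if_true, List.isEmpty_cons, Bool.false_eq_true,
          if_false]
        rw [ih [] ((x :: xs).reverse :: acc)]
        simp [pvScanB, hs, triOf]
    · simp only [PySem.Chars.split₀.go, hs, Bool.false_eq_true, if_false]
      rw [ih (c :: cur) acc]
      match cur with
      | [] =>
        simp [pvScanB, hs, triOf]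
      | [a] =>
        simp [pvScanB, hs, triOf]
      | a :: b :: t =>
        have hsnoc := triOf_snoc2 t.reverse b a c
        simp only [pvScanB, hs, Bool.false_eq_true, if_false, List.take, List.reverse_cons,
          List.reverse_nil, List.nil_append, List.append_assoc, List.cons_append, List.length_cons,
          List.length_cons, List.length_nil, List.tail_cons]
        norm_num
        rw [show (t.reverse ++ [b, a, c]) = (t.reverse ++ b :: a :: [c]) by simp] at hsnoc
        rw [show (t.reverse ++ [b, a]) = (t.reverse ++ b :: [a]) by simp] at hsnoc
        rw [hsnoc, pvScanB_out rest [a, c] [String.ofList [b, a, c]]]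
        simp

-- ===== VERDICT (by name: the statement is the Claim_ definition above) =====
theorem texte_a_trigram_spec : Claim_equal_texte_a_trigram := by
  intro texte _
  show texte_a_trigram texte = texte_a_trigram_alt texte
  unfold texte_a_trigram texte_a_trigram_alt
  rw [foldl_whileA]
  have hmap : (PySem.Str.split₀ texte).flatMap (fun m => triOf m.toList)
      = (PySem.Chars.split₀ texte.toList).flatMap triOf := by
    rw [← PySem.Str.split₀_map_toList, List.flatMap_map]
  rw [hmap]
  have := go_scan texte.toList [] []
  simpa [PySem.Chars.split₀, triOf] using this
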